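-- pv_equiv track=rewrite | github.com/megumi-ben/work13-wd | PNS/baselines/pns_pmns_v1/factor_extractor.py | _scan_literal_runs
-- ===== SOURCE A (Python) =====
-- from typing import List, Optional, Tuple
--
-- def _scan_literal_runs(s: str) -> List[str]:
--     runs: List[str] = []
--     buf: List[str] = []
--     in_class = False
--     escaped = False
--     for ch in s:
--         if escaped:
--             escaped = False
--             if buf:
--                 if len(buf) >= 2:
--                     runs.append("".join(buf))
--                 buf = []
--             continue
--         if ch == "\\":
--             escaped = True
--             continue
--         if ch == "[":
--             if buf and len(buf) >= 2:
--                 runs.append("".join(buf))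
--             buf = []
--             in_class = True
--             continue
--         if ch == "]" and in_class:
--             in_class = False
--             continue
--         if in_class:
--             continue
--         if ch in "(){}|*+?.^$" or ch.isspace():
--             if buf and len(buf) >= 2:
--                 runs.append("".join(buf))
--             buf = []
--             continue
--         if ch.isalnum() or ch == "_":
--             buf.append(ch)
--         else:
--             if buf and len(buf) >= 2:
--                 runs.append("".join(buf))
--             buf = []
--     if buf and len(buf) >= 2:
--         runs.append("".join(buf))
--     return runs
-- ===== SOURCE B (Python) =====
-- from typing import List
--
-- def _scan_literal_runs(s: str) -> List[str]:
--     runs: List[str] = []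
--     n = len(s)
--     i = 0
--     in_class = False
--     while i < n:
--         ch = s[i]
--         if ch == "\\":
--             i += 2  # skip the escaped character; it never joins a run
--             continue
--         if ch == "[":
--             in_class = True
--             i += 1
--             continue
--         if in_class:
--             if ch == "]":
--                 in_class = False
--             i += 1
--             continue
--         if ch.isalnum() or ch == "_":
--             j = i
--             while j < n and (s[j].isalnum() or s[j] == "_"):
--                 j += 1
--             if j - i >= 2:
--                 runs.append(s[i:j])
--             i = j
--             continue
--         i += 1  # any other character is a run boundary
--     return runs
-- ===== Notes on version B (the rewrite author's own statement) =====
-- stated objective: simpler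
-- what changed: Replaced A's four-variable state machine (runs/buf/in_class/escaped flags with per-character buffer appends and repeated flush snippets) by an index-driven scan: explicit boundary transitions for backslash/class/other characters, plus an inner loop that consumes each maximal literal run and slices it out in one piece, so no character buffer or escaped flag is kept.
import Mathlib
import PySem

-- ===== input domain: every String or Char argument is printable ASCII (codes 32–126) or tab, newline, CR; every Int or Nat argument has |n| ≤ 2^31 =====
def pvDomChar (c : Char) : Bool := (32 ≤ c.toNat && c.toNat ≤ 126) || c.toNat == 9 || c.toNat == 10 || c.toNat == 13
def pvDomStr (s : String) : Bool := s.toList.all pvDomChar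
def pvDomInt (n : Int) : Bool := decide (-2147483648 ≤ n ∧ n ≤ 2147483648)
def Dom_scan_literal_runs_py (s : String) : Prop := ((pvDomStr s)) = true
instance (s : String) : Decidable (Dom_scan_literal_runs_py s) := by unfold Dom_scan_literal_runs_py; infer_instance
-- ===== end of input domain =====

-- B replaces A's four-flag buffer state machine by an index-driven scan (outer boundary
-- transitions + inner run-consuming loop that slices each maximal literal run); objective:
-- simpler, same return value.

-- shared one-line char classifier (both Pythons write `ch.isalnum() or ch == "_"` verbatim)
def pvIsLit (c : Char) : Bool := PySem.Chars.isalnum c || c = '_'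

-- ===== PORT A =====
-- A's repeated flush snippet `if buf and len(buf) >= 2: runs.append("".join(buf))`
def pvFlush (buf : List Char) : List String :=
  if buf ≠ [] ∧ 2 ≤ buf.length then [String.mk buf] else []

-- the `for ch in s` loop over state (runs, buf, in_class, escaped), branches in A's order
def pvAloop : List Char → List String → List Char → Bool → Bool → List String
  | [], runs, buf, _, _ => runs ++ pvFlush buf
  | ch :: rest, runs, buf, in_class, escaped =>
    if escaped then
      pvAloop rest (runs ++ pvFlush buf) [] in_class false
    else if ch = '\\' then
      pvAloop rest runs buf in_class true
    else if ch = '[' then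
      pvAloop rest (runs ++ pvFlush buf) [] true false
    else if ch = ']' ∧ in_class = true then
      pvAloop rest runs buf false false
    else if in_class = true then
      pvAloop rest runs buf in_class false
    else if "(){}|*+?.^$".toList.contains ch || PySem.Chars.isspace ch then
      pvAloop rest (runs ++ pvFlush buf) [] in_class false
    else if pvIsLit ch then
      pvAloop rest runs (buf ++ [ch]) in_class false
    else
      pvAloop rest (runs ++ pvFlush buf) [] in_class false

def scan_literal_runs_py (s : String) : List String :=
  pvAloop s.toList [] [] false false

-- ===== PORT B =====
-- B's inner `while j < n and (s[j].isalnum() or s[j] == "_"): j += 1` plus the slice s[i:j]: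
-- returns (the literal run, the remainder)
def pvRun : List Char → List Char × List Char
  | [] => ([], [])
  | c :: rest =>
    if pvIsLit c then ((c :: (pvRun rest).1), (pvRun rest).2)
    else ([], c :: rest)

-- termination measure for the outer while-loop port
theorem pvRun_snd_le (cs : List Char) : (pvRun cs).2.length ≤ cs.length := by
  induction cs with
  | nil => simp [pvRun]
  | cons c r ih =>
    by_cases h : pvIsLit c = true
    · simp only [pvRun, if_pos h]
      exact Nat.le_succ_of_le ih
    · simp [pvRun, h]

-- B's `while i < n` loop; `i += 2` after a backslash is `rest.drop 1`
def pvBloop : List Char → Bool → List String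
  | [], _ => []
  | ch :: rest, in_class =>
    if ch = '\\' then
      pvBloop (rest.drop 1) in_class
    else if ch = '[' then
      pvBloop rest true
    else if in_class = true then
      pvBloop rest (if ch = ']' then false else true)
    else if pvIsLit ch then
      (if 2 ≤ (ch :: (pvRun rest).1).length then [String.mk (ch :: (pvRun rest).1)] else [])
        ++ pvBloop (pvRun rest).2 in_class
    else
      pvBloop rest in_class
  termination_by cs _ => cs.length
  decreasing_by
  · simp only [List.length_drop, List.length_cons]; omega
  · simp
  · simp
  · exact Nat.lt_succ_of_le (pvRun_snd_le rest)
  · simp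

def scan_literal_runs_py_alt (s : String) : List String :=
  pvBloop s.toList false

-- ===== PRECONDITION & SPEC =====
def Spec_scan_literal_runs_py (s : String) (out : List String) : Prop := out = scan_literal_runs_py_alt s
instance (s : String) (out : List String) : Decidable (Spec_scan_literal_runs_py s out) := by unfold Spec_scan_literal_runs_py; infer_instance

-- ===== CLAIM (what is proved, stated in full; the proofs are below) =====
def Claim_equal_scan_literal_runs_py : Prop := ∀ (s : String), Dom_scan_literal_runs_py s → Spec_scan_literal_runs_py s (scan_literal_runs_py s)

-- ===== LEMMAS AND PROOFS =====

theorem pvFlush_emit (buf : List Char) :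
    pvFlush buf = if 2 ≤ buf.length then [String.mk buf] else [] := by
  cases buf with
  | nil => simp [pvFlush]
  | cons c r => simp [pvFlush]

theorem pvIsLit_bs : pvIsLit '\\' = false := by decide

theorem pvIsLit_lb : pvIsLit '[' = false := by decide

-- a literal char has code in 48–57 ∪ 65–90 ∪ 97–122 ∪ {95}
theorem pvLit_range (c : Char) (h : pvIsLit c = true) :
    (48 ≤ c.toNat ∧ c.toNat ≤ 57) ∨ (65 ≤ c.toNat ∧ c.toNat ≤ 90) ∨
    (97 ≤ c.toNat ∧ c.toNat ≤ 122) ∨ c.toNat = 95 := by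
  simp [pvIsLit, PySem.Chars.isalnum, PySem.Chars.isalpha, PySem.Chars.isupper,
        PySem.Chars.islower, PySem.Chars.isdigit] at h
  rcases h with ((⟨h1, h2⟩ | ⟨h1, h2⟩) | ⟨h1, h2⟩) | rfl
  · exact Or.inr (Or.inl ⟨h1, h2⟩)
  · exact Or.inr (Or.inr (Or.inl ⟨h1, h2⟩))
  · exact Or.inl ⟨h1, h2⟩
  · exact Or.inr (Or.inr (Or.inr rfl))

theorem pvLit_not_space (c : Char) (h : pvIsLit c = true) : PySem.Chars.isspace c = false := by
  have hr := pvLit_range c h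
  simp [PySem.Chars.isspace]
  omega

theorem pvLit_not_spec (c : Char) (h : pvIsLit c = true) :
    ("(){}|*+?.^$".toList.contains c) = false := by
  have he : "(){}|*+?.^$".toList = ['(', ')', '{', '}', '|', '*', '+', '?', '.', '^', '$'] := rfl
  rw [he]
  simp only [List.contains_eq_mem, List.mem_cons, List.not_mem_nil, or_false, decide_eq_false_iff_not]
  rintro (rfl | rfl | rfl | rfl | rfl | rfl | rfl | rfl | rfl | rfl | rfl) <;>
    exact absurd h (by decide)

theorem pvLit_ne_backslash (c : Char) (h : pvIsLit c = true) : c ≠ '\\' := by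
  rintro rfl; exact absurd h (by decide)

theorem pvLit_ne_lbrack (c : Char) (h : pvIsLit c = true) : c ≠ '[' := by
  rintro rfl; exact absurd h (by decide)

-- runs only accumulate: pull the accumulator out front
theorem pvAloop_acc (cs : List Char) :
    ∀ runs buf ic esc, pvAloop cs runs buf ic esc = runs ++ pvAloop cs [] buf ic esc := by
  induction cs with
  | nil => intro runs buf ic esc; simp [pvAloop]
  | cons ch rest ih =>
    intro runs buf ic esc
    simp only [pvAloop]
    split_ifs <;>
      first
      | (rw [ih (runs ++ pvFlush buf), ih ([] ++ pvFlush buf)]; simp [List.append_assoc])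
      | rw [ih runs, ih ([])]

-- flushing the pending run then continuing = B's main loop (out of class)
theorem pvC (cs : List Char) :
    pvFlush ((pvRun cs).1) ++ pvBloop ((pvRun cs).2) false = pvBloop cs false := by
  cases cs with
  | nil => simp [pvRun, pvFlush, pvBloop]
  | cons c rest =>
    by_cases h : pvIsLit c = true
    · simp only [pvRun, if_pos h]
      rw [pvFlush_emit]
      have h1 := pvLit_ne_backslash c h
      have h2 := pvLit_ne_lbrack c h
      conv_rhs => rw [pvBloop]
      simp [h, h1, h2]
    · simp only [pvRun, if_neg h]
      simp [pvFlush]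

theorem pvMain (n : Nat) : ∀ cs : List Char, cs.length ≤ n →
    (∀ buf, pvAloop cs [] buf false false
        = pvFlush (buf ++ (pvRun cs).1) ++ pvBloop ((pvRun cs).2) false)
    ∧ pvAloop cs [] [] true false = pvBloop cs true := by
  induction n with
  | zero =>
    intro cs hcs
    have : cs = [] := List.length_eq_zero_iff.mp (Nat.le_zero.mp hcs)
    subst this
    exact ⟨fun buf => by simp [pvAloop, pvRun, pvBloop], by simp [pvAloop, pvFlush, pvBloop]⟩
  | succ n ih =>
    intro cs hcs
    cases cs with
    | nil =>
      exact ⟨fun buf => by simp [pvAloop, pvRun, pvBloop], by simp [pvAloop, pvFlush, pvBloop]⟩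
    | cons ch rest =>
      have hrest : rest.length ≤ n := by simpa using hcs
      constructor
      · intro buf
        by_cases hb : ch = '\\'
        · subst hb
          cases rest with
          | nil => simp [pvAloop, pvRun, pvBloop, pvFlush_emit, pvIsLit_bs]
          | cons c rest' =>
            have hr' : rest'.length ≤ n := by simp at hrest; omega
            simp only [pvAloop, if_neg (by decide : ¬((false : Bool) = true)), reduceIte]
            -- escaped step: flush, then continue with empty buffer
            rw [pvAloop_acc rest' ([] ++ pvFlush buf)]
            rw [(ih rest' hr').1 []]
            simp only [List.nil_append]
            rw [pvC rest']
            have : pvRun ('\\' :: c :: rest') = ([], '\\' :: c :: rest') := by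
              simp [pvRun, pvIsLit_bs]
            rw [this]
            simp only [List.append_nil]
            conv_rhs => rw [pvBloop]
            simp [pvFlush_emit]
        · by_cases hl : ch = '['
          · subst hl
            simp only [pvAloop, if_neg (by decide : ¬((false : Bool) = true)), reduceIte]
            rw [pvAloop_acc rest ([] ++ pvFlush buf), (ih rest hrest).2]
            have : pvRun ('[' :: rest) = ([], '[' :: rest) := by simp [pvRun, pvIsLit_lb]
            rw [this]
            conv_rhs => rw [pvBloop]
            simp [pvFlush_emit]
          · by_cases hlit : pvIsLit ch = true
            · -- literal: A accumulates, B's run grows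
              have hs := pvLit_not_spec ch hlit
              have hsp := pvLit_not_space ch hlit
              simp only [pvAloop, if_neg hb, if_neg hl, and_false, if_false,
                hs, hsp, Bool.or_self, Bool.false_eq_true, reduceIte, if_pos hlit]
              rw [(ih rest hrest).1 (buf ++ [ch])]
              have : pvRun (ch :: rest) = (ch :: (pvRun rest).1, (pvRun rest).2) := by
                simp [pvRun, hlit]
              rw [this]
              simp [List.append_assoc]
            · -- boundary char (special, whitespace, ']' outside a class, other): flush
              have hrun : pvRun (ch :: rest) = ([], ch :: rest) := by simp [pvRun, hlit]
              have hstep : pvAloop (ch :: rest) [] buf false false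
                  = pvFlush buf ++ pvAloop rest [] [] false false := by
                simp only [pvAloop, if_neg hb, if_neg hl, Bool.false_eq_true, and_false, if_false,
                  reduceIte, if_neg hlit]
                split_ifs <;> rw [pvAloop_acc rest ([] ++ pvFlush buf)] <;> simp
              rw [hstep, (ih rest hrest).1 [], List.nil_append, pvC rest, hrun]
              conv_rhs => rw [pvBloop]
              simp [hb, hl, hlit, pvFlush_emit]
      · -- in-class state, empty buffer
        by_cases hb : ch = '\\'
        · subst hb
          cases rest with
          | nil => simp [pvAloop, pvBloop, pvFlush]
          | cons c rest' =>
            have hr' : rest'.length ≤ n := by simp at hrest; omega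
            have step1 : pvAloop ('\\' :: c :: rest') [] [] true false
                = pvAloop (c :: rest') [] [] true true := by
              simp [pvAloop]
            have step2 : pvAloop (c :: rest') [] [] true true
                = pvAloop rest' ([] ++ pvFlush []) [] true false := by
              simp [pvAloop, pvFlush]
            rw [step1, step2, pvAloop_acc rest' ([] ++ pvFlush []), (ih rest' hr').2]
            conv_rhs => rw [pvBloop]
            simp [pvFlush]
        · by_cases hl : ch = '['
          · subst hl
            simp only [pvAloop, reduceIte, if_neg (by decide : ¬('[' = '\\'))]
            rw [pvAloop_acc rest ([] ++ pvFlush []), (ih rest hrest).2]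
            conv_rhs => rw [pvBloop]
            simp [pvFlush]
          · by_cases hr : ch = ']'
            · subst hr
              have step : pvAloop (']' :: rest) [] [] true false
                  = pvAloop rest [] [] false false := by
                simp [pvAloop]
              rw [step, (ih rest hrest).1 [], List.nil_append, pvC rest]
              conv_rhs => rw [pvBloop]
              simp
            · simp only [pvAloop, reduceIte, if_neg hb, if_neg hl,
                if_neg (by simp [hr] : ¬(ch = ']' ∧ (true : Bool) = true))]
              rw [(ih rest hrest).2]
              conv_rhs => rw [pvBloop]
              simp [hb, hl, hr]

-- ===== VERDICT (by name: the statement is the Claim_ definition above) =====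
theorem scan_literal_runs_py_spec : Claim_equal_scan_literal_runs_py := by
  intro s _
  unfold Spec_scan_literal_runs_py scan_literal_runs_py scan_literal_runs_py_alt
  rw [(pvMain s.toList.length s.toList le_rfl).1 [], List.nil_append, pvC]
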